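-- pv_equiv track=rewrite | github.com/pochiman/AlgoExpert | 01_Coding_Interview_Questions/04_Dynamic_Programming_-_21/21_016_Square_of_Zeroes.py | squareOfZeroes
-- ===== SOURCE A (Python) =====
-- def squareOfZeroes(matrix):
--     infoMatrix = preComputeNumOfZeroes(matrix)
--     n = len(matrix)
--     for topRow in range(n):
--         for leftCol in range(n):
--             squareLength = 2
--             while squareLength <= n - leftCol and squareLength <= n - topRow:
--                 bottomRow = topRow + squareLength - 1
--                 rightCol = leftCol + squareLength - 1
--                 if isSquareOfZeroes(infoMatrix, topRow, leftCol, bottomRow, rightCol):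
--                     return True
--                 squareLength += 1
--     return False
--
-- def isSquareOfZeroes(infoMatrix, r1, c1, r2, c2):
--     squareLength = c2 - c1 + 1
--     hasTopBorder = infoMatrix[r1][c1]["numZeroesRight"] >= squareLength
--     hasLeftBorder = infoMatrix[r1][c1]["numZeroesBelow"] >= squareLength
--     hasBottomBorder = infoMatrix[r2][c1]["numZeroesRight"] >= squareLength
--     hasRightBorder = infoMatrix[r1][c2]["numZeroesBelow"] >= squareLength
--     return hasTopBorder and hasLeftBorder and hasBottomBorder and hasRightBorder
--
-- def preComputeNumOfZeroes(matrix):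
--     infoMatrix = [[x for x in row] for row in matrix]
--
--     n = len(matrix)
--     for row in range(n):
--         for col in range(n):
--             numZeroes = 1 if matrix[row][col] == 0 else 0
--             infoMatrix[row][col] = {
--                 "numZeroesBelow": numZeroes,
--                 "numZeroesRight": numZeroes,
--             }
--
--     lastIdx = len(matrix) - 1
--     for row in reversed(range(n)):
--         for col in reversed(range(n)):
--             if matrix[row][col] == 1:
--                 continue
--             if row < lastIdx:
--                 infoMatrix[row][col]["numZeroesBelow"] += infoMatrix[row + 1][col]["numZeroesBelow"]
--             if col < lastIdx:
--                 infoMatrix[row][col]["numZeroesRight"] += infoMatrix[row][col + 1]["numZeroesRight"]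
--
--     return infoMatrix
-- ===== SOURCE B (Python) =====
-- def prefixZeroes(cells):
--     out = [0]
--     for x in cells:
--         out.append(out[-1] + (1 if x == 0 else 0))
--     return out
--
--
-- def onesIdx(cells):
--     return [i for i, x in enumerate(cells) if x == 1]
--
--
-- def squareOfZeroes(matrix):
--     n = len(matrix)
--     rows = [row[:n] for row in matrix]
--     cols = [[matrix[r][c] for r in range(n)] for c in range(n)]
--     rowZ, rowO = [prefixZeroes(l) for l in rows], [onesIdx(l) for l in rows]
--     colZ, colO = [prefixZeroes(l) for l in cols], [onesIdx(l) for l in cols]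
--
--     def clear(Z, O, i, a, L):
--         # at least L zeroes from index a before the first 1 in line i
--         e = next((j for j in O[i] if j >= a), n)
--         return Z[i][e] - Z[i][a] >= L
--
--     return any(
--         clear(rowZ, rowO, r, c, L)
--         and clear(rowZ, rowO, r + L - 1, c, L)
--         and clear(colZ, colO, c, r, L)
--         and clear(colZ, colO, c + L - 1, r, L)
--         for L in range(2, n + 1)
--         for r in range(n - L + 1)
--         for c in range(n - L + 1)
--     )
-- ===== Notes on version B (the rewrite author's own statement) =====
-- stated objective: alternative
-- what changed: B replaces A's per-cell info matrix of propagated zero-run lengths (dicts updated bottom-up right-to-left, with a per-corner while loop) by prefix zero-count tables and ones-position lists per row and column, checks each border side via two prefix-table lookups around the first 1 at-or-after the segment start, and scans candidate squares side-length-outermost with one any-generator.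
import Mathlib
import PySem

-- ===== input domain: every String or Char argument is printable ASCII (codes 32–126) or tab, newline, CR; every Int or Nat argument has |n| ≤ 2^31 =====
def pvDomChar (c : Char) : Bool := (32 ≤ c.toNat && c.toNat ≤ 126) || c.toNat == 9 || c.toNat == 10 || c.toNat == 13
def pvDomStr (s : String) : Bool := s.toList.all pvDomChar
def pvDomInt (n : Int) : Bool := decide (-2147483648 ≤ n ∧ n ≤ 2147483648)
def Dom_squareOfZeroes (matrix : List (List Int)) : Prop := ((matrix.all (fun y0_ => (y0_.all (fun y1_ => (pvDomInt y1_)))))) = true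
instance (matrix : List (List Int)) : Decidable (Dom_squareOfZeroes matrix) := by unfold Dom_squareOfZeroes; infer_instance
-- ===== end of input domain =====

-- B replaces A's per-cell zero-run info matrix (dict of numZeroesBelow/numZeroesRight built by
-- reversed in-place loops) with prefix zero-count tables plus per-line ones-index lists, and scans
-- candidate squares length-outermost (objective: alternative, similar cost).


-- ===== PORT A =====
-- preComputeNumOfZeroes: the two reversed in-place loops are ported as bottom-up row recursion
-- (each cell reads the already-final cell below it and the already-updated cell to its right,
-- exactly the order Python's reversed loops produce); both column loops run over range(n), i.e.
-- over the first n entries of each row, hence the explicit take; the dict with the two fixed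
-- keys numZeroesBelow/numZeroesRight is the pair (below, right).
def preComputeRow (vals belows : List Int) : List (Int × Int) :=
  match vals with
  | [] => []
  | v :: vs =>
    let rest := preComputeRow vs belows.tail
    let b := belows.headD 0
    let r := (rest.headD (0, 0)).2
    (if v == 1 then ((0 : Int), (0 : Int))
     else ((if v == 0 then (1 : Int) else 0) + b, (if v == 0 then (1 : Int) else 0) + r)) :: rest

def preCompute : List (List Int) → List (List (Int × Int))
  | [] => []
  | row :: rows =>
    let rest := preCompute rows
    let belows :=
      match rest with
      | [] => []
      | r :: _ => r.map (·.1)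
    preComputeRow row belows :: rest

def preComputeNum (matrix : List (List Int)) : List (List (Int × Int)) :=
  preCompute (matrix.map fun row => row.take matrix.length)

def infoGet (info : List (List (Int × Int))) (r c : Int) : Int × Int :=
  PySem.List.pyGetD (PySem.List.pyGetD info r []) c (0, 0)

def isSquareOfZeroesL (info : List (List (Int × Int))) (r1 c1 r2 c2 : Int) : Bool :=
  let sq := c2 - c1 + 1
  decide (sq ≤ (infoGet info r1 c1).2) && decide (sq ≤ (infoGet info r1 c1).1) &&
    decide (sq ≤ (infoGet info r2 c1).2) && decide (sq ≤ (infoGet info r1 c2).1)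

-- the while loop (squareLength only grows until its bound, no other exit) is the range
-- 2 .. min(n - leftCol, n - topRow); Python's first-True return is List.any; indices into the
-- info matrix are in range under Pre_
def squareOfZeroes (matrix : List (List Int)) : Bool :=
  let info := preComputeNum matrix
  let n : Int := matrix.length
  (PySem.List.pyRange 0 n 1).any fun topRow =>
    (PySem.List.pyRange 0 n 1).any fun leftCol =>
      (PySem.List.pyRange 2 (min (n - leftCol) (n - topRow) + 1) 1).any fun sq =>
        isSquareOfZeroesL info topRow leftCol (topRow + sq - 1) (leftCol + sq - 1)

-- ===== PORT B =====
def prefixZeroes (cells : List Int) : List Int :=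
  cells.foldl (fun out x => out ++ [out.getLastD 0 + (if x == 0 then (1 : Int) else 0)]) [0]

def onesIdx (cells : List Int) : List Int :=
  ((PySem.List.enumerate cells).filter (fun p => p.2 == 1)).map (·.1)

-- table[i][j]; indices are in range under Pre_
def tblGet (tbl : List (List Int)) (i j : Int) : Int :=
  PySem.List.pyGetD (PySem.List.pyGetD tbl i []) j 0

def lineClear (Z O : List (List Int)) (n i a L : Int) : Bool :=
  let e := ((PySem.List.pyGetD O i []).find? (fun j => decide (a ≤ j))).getD n
  decide (L ≤ tblGet Z i e - tblGet Z i a)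

def squareOfZeroes_alt (matrix : List (List Int)) : Bool :=
  let n : Int := matrix.length
  let rows := matrix.map fun row => PySem.List.slice row none (some n)
  let cols := (PySem.List.pyRange 0 n 1).map fun c =>
    matrix.map fun row => PySem.List.pyGetD row c 0
  let rowZ := rows.map prefixZeroes
  let rowO := rows.map onesIdx
  let colZ := cols.map prefixZeroes
  let colO := cols.map onesIdx
  (PySem.List.pyRange 2 (n + 1) 1).any fun L =>
    (PySem.List.pyRange 0 (n - L + 1) 1).any fun r =>
      (PySem.List.pyRange 0 (n - L + 1) 1).any fun c =>
        lineClear rowZ rowO n r c L && lineClear rowZ rowO n (r + L - 1) c L &&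
          lineClear colZ colO n c r L && lineClear colZ colO n (c + L - 1) r L

-- ===== PRECONDITION & SPEC =====
-- Pre_ excludes exactly the ragged matrices on which A raises IndexError (a row shorter than
-- n = len(matrix); both column loops run over range(n) on every row).
def Pre_squareOfZeroes (matrix : List (List Int)) : Prop :=
  ∀ row ∈ matrix, matrix.length ≤ row.length
instance (matrix : List (List Int)) : Decidable (Pre_squareOfZeroes matrix) := by
  unfold Pre_squareOfZeroes; infer_instance

def pvWitness_squareOfZeroes : List (List Int) := [[0, 0], [0, 0]]

def Spec_squareOfZeroes (matrix : List (List Int)) (out : Bool) : Prop := out = squareOfZeroes_alt matrix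
instance (matrix : List (List Int)) (out : Bool) : Decidable (Spec_squareOfZeroes matrix out) := by
  unfold Spec_squareOfZeroes; infer_instance

-- ===== CLAIM (what is proved, stated in full; the proofs are below) =====
def Claim_equal_squareOfZeroes : Prop := ∀ (matrix : List (List Int)), Dom_squareOfZeroes matrix → Pre_squareOfZeroes matrix → Spec_squareOfZeroes matrix (squareOfZeroes matrix)

-- ===== LEMMAS AND PROOFS =====
-- proof-side: number of zeroes a line holds before its first 1 (what A's info matrix stores per cell)
def zrunA : List Int → Int
  | [] => 0
  | v :: vs => if v = 1 then 0 else (if v = 0 then 1 else 0) + zrunA vs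

def zcnt (l : List Int) : Int := (l.countP (fun v => v == 0) : Nat)

def mtr (m : List (List Int)) : List (List Int) := m.map fun row => row.take m.length

def colL (m : List (List Int)) (c : Nat) : List Int := m.map (fun row => row.getD c 0)

def ExB (m : List (List Int)) : Prop :=
  ∃ L r c : Nat, 2 ≤ L ∧ r + L ≤ m.length ∧ c + L ≤ m.length ∧
    (L : Int) ≤ zrunA (((mtr m).getD r []).drop c) ∧
    (L : Int) ≤ zrunA (((mtr m).getD (r + L - 1) []).drop c) ∧
    (L : Int) ≤ zrunA ((colL (mtr m) c).drop r) ∧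
    (L : Int) ≤ zrunA ((colL (mtr m) (c + L - 1)).drop r)

theorem getD_tail (l : List Int) (j : Nat) : l.tail.getD j 0 = l.getD (j + 1) 0 := by
  cases l <;> simp

theorem headD_getD {α : Type} (l : List α) (d : α) : l.headD d = l.getD 0 d := by
  cases l <;> simp

theorem preComputeRow_length (vals belows : List Int) :
    (preComputeRow vals belows).length = vals.length := by
  induction vals generalizing belows with
  | nil => simp [preComputeRow]
  | cons v vs ih => simp [preComputeRow, ih]

theorem preComputeRow_getD (vals belows : List Int) (j : Nat) (hj : j < vals.length) :
    (preComputeRow vals belows).getD j (0, 0) =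
      ((if vals.getD j 0 = 1 then 0
        else (if vals.getD j 0 = 0 then 1 else 0) + belows.getD j 0), zrunA (vals.drop j)) := by
  induction vals generalizing belows j with
  | nil => simp at hj
  | cons v vs ih =>
    cases j with
    | zero =>
      have hr : ((preComputeRow vs belows.tail).headD (0, 0)).2 = zrunA vs := by
        cases vs with
        | nil => simp [preComputeRow, zrunA]
        | cons w ws =>
          rw [headD_getD, ih belows.tail 0 (by simp)]
          simp
      by_cases hv : v = 1 <;> simp [preComputeRow, zrunA, hv]
      · exact ⟨by cases belows <;> simp, by simpa using hr⟩
    | succ j =>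
      simp only [preComputeRow, List.getD_cons_succ, List.drop_succ_cons]
      rw [ih belows.tail j (by simpa using hj), getD_tail]

theorem preCompute_getD (m : List (List Int)) (w : Nat)
    (hlen : ∀ row ∈ m, row.length = w)
    (i j : Nat) (hi : i < m.length) (hj : j < w) :
    ((preCompute m).getD i []).getD j (0, 0) =
      (zrunA ((colL m j).drop i), zrunA ((m.getD i []).drop j)) := by
  induction m generalizing i with
  | nil => simp at hi
  | cons row rows ih =>
    cases i with
    | succ i =>
      have := ih (fun r hr => hlen r (List.mem_cons_of_mem _ hr)) i (by simpa using hi)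
      simpa [preCompute, colL] using this
    | zero =>
      have hjr : j < row.length := by rw [hlen row (by simp)]; exact hj
      have hcol : colL (row :: rows) j = row.getD j 0 :: colL rows j := by simp [colL]
      rw [show ((preCompute (row :: rows)).getD 0 []) = preComputeRow row
          (match preCompute rows with | [] => [] | r :: _ => r.map (·.1)) from by
        simp [preCompute]]
      rw [preComputeRow_getD row _ j hjr]
      rw [List.drop_zero, hcol]
      have hbel : (match preCompute rows with
          | [] => [] | r :: _ => r.map (·.1) : List Int).getD j 0 = zrunA (colL rows j) := by
        rcases rows with _ | ⟨row', rows'⟩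
        · simp [preCompute, colL, zrunA]
        · have h0 := ih (fun r hr => hlen r (List.mem_cons_of_mem _ hr)) 0 (by simp)
          simp only [preCompute, List.getD_cons_zero, List.drop_zero] at h0 ⊢
          have hl : j < (preComputeRow row'
              (match preCompute rows' with | [] => ([] : List Int) | r :: _ => r.map (·.1))).length := by
            rw [preComputeRow_length, hlen row' (by simp)]; exact hj
          rw [List.getD_eq_getElem _ _ (by simpa using hl), List.getElem_map,
            ← List.getD_eq_getElem _ ((0 : Int), (0 : Int)) hl, h0]
      rw [hbel]
      simp only [zrunA]
      split <;> rfl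

theorem mtr_length (m : List (List Int)) : (mtr m).length = m.length := by simp [mtr]

theorem mtr_rows (m : List (List Int)) (h : Pre_squareOfZeroes m) :
    ∀ row ∈ mtr m, row.length = m.length := by
  intro row hrow
  simp only [mtr, List.mem_map] at hrow
  obtain ⟨r, hr, rfl⟩ := hrow
  simp [h r hr]

theorem infoGet_natCast (info : List (List (Int × Int))) (r c : Nat) :
    infoGet info (r : Int) (c : Int) = (info.getD r []).getD c (0, 0) := by
  simp [infoGet]

theorem colL_length (m : List (List Int)) (c : Nat) : (colL m c).length = m.length := by
  simp [colL]

theorem check_iff (m : List (List Int)) (h : Pre_squareOfZeroes m)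
    (tn ln sqn : Nat) (h2 : 2 ≤ sqn) (hts : tn + sqn ≤ m.length) (hls : ln + sqn ≤ m.length) :
    isSquareOfZeroesL (preComputeNum m) (tn : Int) (ln : Int)
        ((tn : Int) + (sqn : Int) - 1) ((ln : Int) + (sqn : Int) - 1) = true ↔
      ((sqn : Int) ≤ zrunA (((mtr m).getD tn []).drop ln) ∧
        (sqn : Int) ≤ zrunA (((mtr m).getD (tn + sqn - 1) []).drop ln) ∧
        (sqn : Int) ≤ zrunA ((colL (mtr m) ln).drop tn) ∧
        (sqn : Int) ≤ zrunA ((colL (mtr m) (ln + sqn - 1)).drop tn)) := by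
  have hlen := mtr_rows m h
  have hml := mtr_length m
  have hct : ((tn : Int) + (sqn : Int) - 1) = ((tn + sqn - 1 : Nat) : Int) := by omega
  have hcl : ((ln : Int) + (sqn : Int) - 1) = ((ln + sqn - 1 : Nat) : Int) := by omega
  have hsq : ((ln + sqn - 1 : Nat) : Int) - (ln : Int) + 1 = (sqn : Int) := by omega
  unfold isSquareOfZeroesL preComputeNum
  rw [show (m.map fun row => row.take m.length) = mtr m from rfl]
  simp only [hct, hcl, infoGet_natCast, Bool.and_eq_true, decide_eq_true_eq, hsq]
  rw [preCompute_getD (mtr m) m.length hlen tn ln (by omega) (by omega),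
    preCompute_getD (mtr m) m.length hlen (tn + sqn - 1) ln (by omega) (by omega),
    preCompute_getD (mtr m) m.length hlen tn (ln + sqn - 1) (by omega) (by omega)]
  dsimp only
  constructor
  · rintro ⟨⟨⟨h1, h2'⟩, h3⟩, h4⟩
    exact ⟨h1, h3, h2', h4⟩
  · rintro ⟨h1, h3, h2', h4⟩
    exact ⟨⟨⟨h1, h2'⟩, h3⟩, h4⟩

theorem A_iff (m : List (List Int)) (h : Pre_squareOfZeroes m) :
    squareOfZeroes m = true ↔ ExB m := by
  unfold squareOfZeroes
  simp only [List.any_eq_true, PySem.List.mem_pyRange_one]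
  constructor
  · rintro ⟨t, ⟨ht0, htn⟩, l, ⟨hl0, hln⟩, sq, ⟨hsq2, hsqb⟩, hchk⟩
    obtain ⟨tn, rfl⟩ := Int.eq_ofNat_of_zero_le ht0
    obtain ⟨ln, rfl⟩ := Int.eq_ofNat_of_zero_le hl0
    obtain ⟨sqn, rfl⟩ := Int.eq_ofNat_of_zero_le (by omega : (0 : Int) ≤ sq)
    have h2 : 2 ≤ sqn := by exact_mod_cast hsq2
    have hts : tn + sqn ≤ m.length := by omega
    have hls : ln + sqn ≤ m.length := by omega
    obtain ⟨c1, c2, c3, c4⟩ := (check_iff m h tn ln sqn h2 hts hls).1 hchk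
    exact ⟨sqn, tn, ln, h2, hts, hls, c1, c2, c3, c4⟩
  · rintro ⟨L, r, c, h2, hr, hc, c1, c2, c3, c4⟩
    refine ⟨(r : Int), ⟨by positivity, by exact_mod_cast (by omega : r < m.length)⟩,
      (c : Int), ⟨by positivity, by exact_mod_cast (by omega : c < m.length)⟩,
      (L : Int), ⟨by exact_mod_cast h2, by omega⟩, ?_⟩
    exact (check_iff m h r c L h2 hr hc).2 ⟨c1, c2, c3, c4⟩

def runList (s : Int) : List Int → List Int
  | [] => []
  | v :: vs => (s + (if v == 0 then (1 : Int) else 0)) :: runList (s + (if v == 0 then (1 : Int) else 0)) vs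

theorem foldl_prefix (l init : List Int) :
    l.foldl (fun out x => out ++ [out.getLastD 0 + (if x == 0 then (1 : Int) else 0)]) init
      = init ++ runList (init.getLastD 0) l := by
  induction l generalizing init with
  | nil => simp [runList]
  | cons v vs ih =>
    rw [List.foldl_cons, ih]
    simp [runList, List.append_assoc]

theorem runList_getD (l : List Int) (s : Int) (k : Nat) (hk : k < l.length) :
    (runList s l).getD k 0 = s + zcnt (l.take (k + 1)) := by
  induction l generalizing s k with
  | nil => simp at hk
  | cons v vs ih =>
    cases k with
    | zero => simp [runList, zcnt, List.countP_cons]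
    | succ k =>
      rw [show runList s (v :: vs) = (s + (if v == 0 then (1 : Int) else 0)) ::
          runList (s + (if v == 0 then (1 : Int) else 0)) vs from rfl]
      rw [List.getD_cons_succ, ih _ _ (by simpa using hk)]
      simp [zcnt, List.countP_cons]
      split <;> omega

theorem prefixZeroes_getD (l : List Int) (k : Nat) (hk : k ≤ l.length) :
    (prefixZeroes l).getD k 0 = zcnt (l.take k) := by
  rw [prefixZeroes, foldl_prefix]
  cases k with
  | zero => simp [zcnt]
  | succ k =>
    rw [show ([(0 : Int)] ++ runList (List.getLastD [0] 0) l) = (0 : Int) :: runList 0 l by simp]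
    rw [List.getD_cons_succ, runList_getD l 0 k (by omega)]
    ring

theorem zcnt_seg (l : List Int) (a b : Nat) :
    zcnt (l.take (a + b)) - zcnt (l.take a) = zcnt ((l.drop a).take b) := by
  rw [List.take_add, zcnt, List.countP_append]
  simp [zcnt]

theorem zrunA_zcnt (d : List Int) :
    zrunA d = zcnt (d.take (d.findIdx (fun v => v == 1))) := by
  induction d with
  | nil => simp [zrunA, zcnt]
  | cons v vs ih =>
    rw [List.findIdx_cons]
    by_cases hv : v = 1
    · simp [zrunA, hv, zcnt]
    · have : (v == 1) = false := by simpa using hv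
      rw [this]
      simp only [cond_false, List.take_succ_cons]
      rw [show zrunA (v :: vs) = (if v = 0 then 1 else 0) + zrunA vs by simp [zrunA, hv]]
      rw [ih]
      simp [zcnt, List.countP_cons]
      split <;> omega

theorem onesIdx_eq (l : List Int) :
    onesIdx l = (PySem.List.pyRange 0 (l.length : Int) 1).filter
      (fun j => PySem.List.pyGetD l j 0 == 1) := by
  rw [onesIdx, PySem.List.enumerate_eq_map_pyRange l 0, List.filter_map]
  simp [Function.comp_def]

theorem head_filtered (l : List Int) (a a' : Nat) (haa : a ≤ a') (ha : a' ≤ l.length) :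
    ((((PySem.List.pyRange (a' : Int) (l.length : Int) 1).filter
        (fun j => decide ((a : Int) ≤ j) && (PySem.List.pyGetD l j 0 == 1)))).head?).getD (l.length : Int)
      = ((a' + (l.drop a').findIdx (fun v => v == 1) : Nat) : Int) := by
  induction hfuel : l.length - a' generalizing a' with
  | zero =>
    have he : a' = l.length := by omega
    subst he
    rw [PySem.List.pyRange_one_eq_nil (le_refl _), List.drop_length]
    simp
  | succ k ih =>
    have hlt : a' < l.length := by omega
    rw [PySem.List.pyRange_one_cons (by exact_mod_cast hlt), List.filter_cons]
    have hget : PySem.List.pyGetD l (a' : Int) 0 = l[a'] := by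
      rw [PySem.List.pyGetD_natCast, List.getD_eq_getElem _ _ hlt]
    rw [List.drop_eq_getElem_cons hlt, List.findIdx_cons]
    by_cases h1 : l[a'] = 1
    · simp [hget, h1, haa]
    · have hpred : (decide ((a : Int) ≤ (a' : Int)) && (PySem.List.pyGetD l (a' : Int) 0 == 1)) = false := by
        simp [hget, h1]
      rw [hpred, if_neg (by simp)]
      have := ih (a' + 1) (by omega) (by omega) (by omega)
      rw [show ((a' + 1 : Nat) : Int) = (a' : Int) + 1 by push_cast; ring] at this
      rw [this]
      have : (l[a'] == 1) = false := by simpa using h1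
      rw [this]
      simp only [cond_false]
      omega

theorem ones_find (l : List Int) (a : Nat) (ha : a ≤ l.length) :
    (((onesIdx l).find? (fun j => decide ((a : Int) ≤ j))).getD (l.length : Int))
      = ((a + (l.drop a).findIdx (fun v => v == 1) : Nat) : Int) := by
  rw [onesIdx_eq, ← List.head?_filter, List.filter_filter]
  rw [PySem.List.pyRange_one_append 0 (a : Int) (l.length : Int) (by positivity) (by exact_mod_cast ha),
    List.filter_append, List.head?_append]
  rw [show ((PySem.List.pyRange 0 (a : Int) 1).filter
      (fun j => decide ((a : Int) ≤ j) && (PySem.List.pyGetD l j 0 == 1))) = [] from by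
    rw [List.filter_eq_nil_iff]
    intro x hx
    rw [PySem.List.mem_pyRange_one] at hx
    simp only [Bool.and_eq_true, decide_eq_true_eq, not_and]
    intro hax
    omega]
  rw [show ([] : List Int).head? = none from rfl, Option.none_or]
  exact head_filtered l a a (le_refl a) ha

theorem clear_line (l : List Int) (a L : Nat) (ha : a ≤ l.length) :
    ((L : Int) ≤ PySem.List.pyGetD (prefixZeroes l)
        (((onesIdx l).find? (fun j => decide ((a : Int) ≤ j))).getD (l.length : Int)) 0
      - PySem.List.pyGetD (prefixZeroes l) (a : Int) 0) ↔ (L : Int) ≤ zrunA (l.drop a) := by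
  rw [ones_find l a ha, PySem.List.pyGetD_natCast, PySem.List.pyGetD_natCast]
  have hf : (l.drop a).findIdx (fun v => v == 1) ≤ l.length - a := by
    have h1 := List.findIdx_le_length (p := fun v => v == 1) (xs := l.drop a)
    rw [List.length_drop] at h1
    exact h1
  rw [prefixZeroes_getD l _ (by omega), prefixZeroes_getD l a (by omega), zcnt_seg,
    ← zrunA_zcnt]

theorem map_getD {α β : Type} (f : α → β) (m : List α) (d : β) (d' : α) (i : Nat)
    (hi : i < m.length) : (m.map f).getD i d = f (m.getD i d') := by
  rw [List.getD_eq_getElem _ _ (by simpa using hi), List.getElem_map, List.getD_eq_getElem _ _ hi]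

theorem lineClear_row (m : List (List Int)) (h : Pre_squareOfZeroes m) (i a L : Nat)
    (hi : i < m.length) (ha : a ≤ m.length) :
    lineClear ((mtr m).map prefixZeroes) ((mtr m).map onesIdx) (m.length : Int)
        (i : Int) (a : Int) (L : Int) = true ↔
      (L : Int) ≤ zrunA (((mtr m).getD i []).drop a) := by
  have hmi : i < (mtr m).length := by rw [mtr_length]; exact hi
  have hll : ((mtr m).getD i []).length = m.length := mtr_rows m h _ (by
    rw [List.getD_eq_getElem _ _ hmi]; exact List.getElem_mem _)
  rw [lineClear, tblGet, tblGet]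
  rw [PySem.List.pyGetD_natCast ((mtr m).map onesIdx),
    map_getD onesIdx (mtr m) [] [] i hmi,
    PySem.List.pyGetD_natCast ((mtr m).map prefixZeroes),
    map_getD prefixZeroes (mtr m) [] [] i hmi]
  rw [decide_eq_true_eq, show ((m.length : Nat) : Int) = (((mtr m).getD i []).length : Int) by rw [hll]]
  exact clear_line ((mtr m).getD i []) a L (by omega)

theorem colL_take (m : List (List Int)) (h : Pre_squareOfZeroes m) (c : Nat)
    (hc : c < m.length) : colL (mtr m) c = colL m c := by
  rw [colL, colL, mtr, List.map_map]
  apply List.map_congr_left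
  intro row hrow
  have := h row hrow
  simp only [Function.comp_apply, List.getD, List.getElem?_take]
  rw [if_pos hc]

theorem lineClear_col (m : List (List Int)) (h : Pre_squareOfZeroes m) (c a L : Nat)
    (hc : c < m.length) (ha : a ≤ m.length) :
    lineClear (((PySem.List.pyRange 0 (m.length : Int) 1).map fun cc =>
          m.map fun row => PySem.List.pyGetD row cc 0).map prefixZeroes)
        (((PySem.List.pyRange 0 (m.length : Int) 1).map fun cc =>
          m.map fun row => PySem.List.pyGetD row cc 0).map onesIdx) (m.length : Int)
        (c : Int) (a : Int) (L : Int) = true ↔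
      (L : Int) ≤ zrunA ((colL (mtr m) c).drop a) := by
  have hcl : (m.map fun row => PySem.List.pyGetD row (c : Int) 0) = colL (mtr m) c := by
    rw [colL_take m h c hc, colL]
    simp
  rw [lineClear, tblGet, tblGet, List.map_map, List.map_map]
  rw [PySem.List.pyGetD_map_pyRange_of_nonneg _ _ _ _ (by positivity) (by exact_mod_cast hc),
    PySem.List.pyGetD_map_pyRange_of_nonneg _ _ _ _ (by positivity) (by exact_mod_cast hc)]
  rw [decide_eq_true_eq]
  simp only [Function.comp_apply, hcl]
  rw [show ((m.length : Nat) : Int) = ((colL (mtr m) c).length : Int) by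
      rw [colL_length, mtr_length]]
  exact clear_line (colL (mtr m) c) a L (by rw [colL_length, mtr_length]; omega)

theorem B_iff (m : List (List Int)) (h : Pre_squareOfZeroes m) :
    squareOfZeroes_alt m = true ↔ ExB m := by
  unfold squareOfZeroes_alt
  simp only [List.any_eq_true, PySem.List.mem_pyRange_one, Bool.and_eq_true]
  rw [show (m.map fun row => PySem.List.slice row none (some (m.length : Int))) = mtr m from by
    simp [mtr, PySem.List.slice_to_natCast]]
  constructor
  · rintro ⟨len, ⟨hl2, hlu⟩, r1, ⟨hr0, hru⟩, c1, ⟨hc0, hcu⟩, ⟨⟨k1, k2⟩, k3⟩, k4⟩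
    obtain ⟨L, rfl⟩ := Int.eq_ofNat_of_zero_le (by omega : (0 : Int) ≤ len)
    obtain ⟨rn, rfl⟩ := Int.eq_ofNat_of_zero_le hr0
    obtain ⟨cn, rfl⟩ := Int.eq_ofNat_of_zero_le hc0
    have h2 : 2 ≤ L := by exact_mod_cast hl2
    have hts : rn + L ≤ m.length := by omega
    have hls : cn + L ≤ m.length := by omega
    have e2 : ((rn : Int) + (L : Int) - 1) = ((rn + L - 1 : Nat) : Int) := by omega
    have e4 : ((cn : Int) + (L : Int) - 1) = ((cn + L - 1 : Nat) : Int) := by omega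
    rw [lineClear_row m h rn cn L (by omega) (by omega)] at k1
    rw [e2, lineClear_row m h (rn + L - 1) cn L (by omega) (by omega)] at k2
    rw [lineClear_col m h cn rn L (by omega) (by omega)] at k3
    rw [e4, lineClear_col m h (cn + L - 1) rn L (by omega) (by omega)] at k4
    exact ⟨L, rn, cn, h2, hts, hls, k1, k2, k3, k4⟩
  · rintro ⟨L, r, c, h2, hr, hc, c1, c2, c3, c4⟩
    have e2 : ((r : Int) + (L : Int) - 1) = ((r + L - 1 : Nat) : Int) := by omega
    have e4 : ((c : Int) + (L : Int) - 1) = ((c + L - 1 : Nat) : Int) := by omega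
    refine ⟨(L : Int), ⟨by exact_mod_cast h2, by omega⟩,
      (r : Int), ⟨by positivity, by omega⟩,
      (c : Int), ⟨by positivity, by omega⟩, ⟨⟨?_, ?_⟩, ?_⟩, ?_⟩
    · rw [lineClear_row m h r c L (by omega) (by omega)]; exact c1
    · rw [e2, lineClear_row m h (r + L - 1) c L (by omega) (by omega)]; exact c2
    · rw [lineClear_col m h c r L (by omega) (by omega)]; exact c3
    · rw [e4, lineClear_col m h (c + L - 1) r L (by omega) (by omega)]; exact c4

-- ===== VERDICT (by name: the statement is the Claim_ definition above) =====
theorem squareOfZeroes_spec : Claim_equal_squareOfZeroes := by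
  intro m _ hpre
  unfold Spec_squareOfZeroes
  rw [Bool.eq_iff_iff, A_iff m hpre, B_iff m hpre]
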